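-- pv_equiv track=rewrite | github.com/kiwidamien/katas | aoc2025/day01/day01.py | make_stream
-- ===== SOURCE A (Python) =====
-- def make_stream(start: int, moves: [int]) -> [int]:
--     states = [start]
--     for move in moves:
--         n = abs(move)
--         direction = 1 if move > 0 else -1
--         new = [num % 100 for num in range(states[-1] + direction, states[-1] + direction + move, direction)]
--         states.extend(new)
--     return states
-- ===== SOURCE B (Python) =====
-- def make_stream(start, moves):
--     # Phase 1: flatten the moves into unit steps.
--     deltas = []
--     for move in moves:
--         deltas.extend([1 if move > 0 else -1] * abs(move))
--     # Phase 2: prefix-sum accumulation over the unit steps.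
--     states = [start]
--     running = start
--     for d in deltas:
--         running += d
--         states.append(running % 100)
--     return states
-- ===== Notes on version B (the rewrite author's own statement) =====
-- stated objective: alternative
-- what changed: Replaces A's per-move range-comprehension offset from the (modded) last state by a two-phase flatten-then-accumulate: flatten every move into +-1 unit steps, then a single prefix-sum pass from the unmodded start appending running % 100.
import Mathlib
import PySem

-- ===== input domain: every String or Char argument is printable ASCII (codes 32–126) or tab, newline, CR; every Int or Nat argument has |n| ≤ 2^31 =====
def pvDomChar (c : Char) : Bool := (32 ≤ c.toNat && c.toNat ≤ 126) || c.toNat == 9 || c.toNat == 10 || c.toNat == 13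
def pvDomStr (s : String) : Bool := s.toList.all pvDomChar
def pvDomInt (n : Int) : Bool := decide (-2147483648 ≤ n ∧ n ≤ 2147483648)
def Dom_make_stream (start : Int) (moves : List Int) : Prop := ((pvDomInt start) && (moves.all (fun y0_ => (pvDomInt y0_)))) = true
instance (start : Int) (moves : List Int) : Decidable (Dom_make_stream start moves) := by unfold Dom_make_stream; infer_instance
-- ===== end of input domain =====

-- B replaces A's per-move range comprehension by a flatten-into-unit-steps then prefix-sum pass (alternative decomposition, same cost).


-- ===== PORT A =====
-- the for-loop over moves, carrying the states list (states[-1] exists: states starts as [start] and only grows)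
def goA (states : List Int) : List Int → List Int
  | [] => states
  | move :: rest =>
      let direction : Int := if move > 0 then 1 else -1
      let last := PySem.List.pyGetD states (-1) 0
      let new := (PySem.List.pyRange (last + direction) (last + direction + move) direction).map
                   (fun num => PySem.Int.mod num 100)
      goA (states ++ new) rest

def make_stream (start : Int) (moves : List Int) : List Int :=
  goA [start] moves

-- ===== PORT B =====
-- phase 1 of Source B: flatten the moves into ±1 unit steps (deltas.extend(...))
def deltasB (ds : List Int) : List Int → List Int
  | [] => ds
  | move :: rest => deltasB (ds ++ List.replicate move.natAbs (if move > 0 then (1 : Int) else -1)) rest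

-- phase 2 of Source B: prefix-sum accumulation (running += d; states.append(running % 100))
def accB (states : List Int) (running : Int) : List Int → List Int
  | [] => states
  | d :: rest => accB (states ++ [PySem.Int.mod (running + d) 100]) (running + d) rest

def make_stream_alt (start : Int) (moves : List Int) : List Int :=
  accB [start] start (deltasB [] moves)

-- ===== PRECONDITION & SPEC =====
def Spec_make_stream (start : Int) (moves : List Int) (out : List Int) : Prop := out = make_stream_alt start moves
instance (start : Int) (moves : List Int) (out : List Int) : Decidable (Spec_make_stream start moves out) := by unfold Spec_make_stream; infer_instance

-- ===== CLAIM (what is proved, stated in full; the proofs are below) =====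
def Claim_equal_make_stream : Prop := ∀ (start : Int) (moves : List Int), Dom_make_stream start moves → Spec_make_stream start moves (make_stream start moves)

-- ===== LEMMAS AND PROOFS =====

-- the common shape of one expanded move: n successive steps of size dir from r, each taken mod 100
def segAcc (r dir : Int) : Nat → List Int
  | 0 => []
  | n + 1 => PySem.Int.mod (r + dir) 100 :: segAcc (r + dir) dir n

lemma mod100 (x : Int) : PySem.Int.mod x 100 = x % 100 :=
  PySem.Int.mod_eq_emod_of_pos (by norm_num)

lemma mod100_idem (x : Int) : PySem.Int.mod (PySem.Int.mod x 100) 100 = PySem.Int.mod x 100 := by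
  rw [mod100, mod100]; omega

lemma segAcc_snoc (n : Nat) : ∀ (r dir : Int),
    segAcc r dir (n + 1) = segAcc r dir n ++ [PySem.Int.mod (r + (n + 1) * dir) 100] := by
  induction n with
  | zero => intro r dir; simp [segAcc]
  | succ m ih =>
      intro r dir
      show PySem.Int.mod (r + dir) 100 :: segAcc (r + dir) dir (m + 1) = _
      rw [ih (r + dir) dir]
      simp [segAcc]
      ring_nf

lemma segAcc_congr (n : Nat) : ∀ (r r' dir : Int),
    PySem.Int.mod r 100 = PySem.Int.mod r' 100 → segAcc r dir n = segAcc r' dir n := by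
  induction n with
  | zero => intro r r' dir _; rfl
  | succ m ih =>
      intro r r' dir h
      have h' : PySem.Int.mod (r + dir) 100 = PySem.Int.mod (r' + dir) 100 := by
        rw [mod100, mod100] at h ⊢; omega
      simp only [segAcc]
      rw [h', ih (r + dir) (r' + dir) dir h']

lemma rangeA_pos (n : Nat) : ∀ (a : Int),
    (PySem.List.pyRange a (a + n) 1).map (fun num => PySem.Int.mod num 100) = segAcc (a - 1) 1 n := by
  induction n with
  | zero => intro a; rw [PySem.List.pyRange_one_eq_nil (by omega)]; rfl
  | succ m ih =>
      intro a
      rw [PySem.List.pyRange_one_cons (by push_cast; omega)]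
      have : a + ((m + 1 : Nat) : Int) = (a + 1) + (m : Nat) := by push_cast; ring
      rw [this]
      simp only [List.map_cons, ih (a + 1)]
      show _ = segAcc (a - 1) 1 (m + 1)
      simp [segAcc]

lemma rangeA_neg (n : Nat) : ∀ (a : Int),
    (PySem.List.pyRange a (a - n) (-1)).map (fun num => PySem.Int.mod num 100) = segAcc (a + 1) (-1) n := by
  induction n with
  | zero => intro a; rw [PySem.List.pyRange_neg_one_eq_nil (by omega)]; rfl
  | succ m ih =>
      intro a
      rw [PySem.List.pyRange_neg_one_cons (by push_cast; omega)]
      have : a - ((m + 1 : Nat) : Int) = (a - 1) - (m : Nat) := by push_cast; ring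
      rw [this]
      simp only [List.map_cons, ih (a - 1)]
      show _ = segAcc (a + 1) (-1) (m + 1)
      simp [segAcc]

lemma deltasB_acc (ms : List Int) : ∀ (ds : List Int), deltasB ds ms = ds ++ deltasB [] ms := by
  induction ms with
  | nil => intro ds; simp [deltasB]
  | cons m rest ih =>
      intro ds
      show deltasB (ds ++ _) rest = ds ++ deltasB (([] : List Int) ++ _) rest
      rw [ih (ds ++ _), ih (([] : List Int) ++ _)]
      simp

lemma accB_replicate (n : Nat) : ∀ (states : List Int) (r dir : Int),
    accB states r (List.replicate n dir) = states ++ segAcc r dir n := by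
  induction n with
  | zero => intro states r dir; simp [accB, segAcc]
  | succ m ih =>
      intro states r dir
      rw [List.replicate_succ]
      show accB (states ++ [PySem.Int.mod (r + dir) 100]) (r + dir) (List.replicate m dir) = _
      rw [ih]
      simp [segAcc]

lemma accB_append (xs : List Int) : ∀ (ys states : List Int) (r : Int),
    accB states r (xs ++ ys) = accB (accB states r xs) (r + xs.sum) ys := by
  induction xs with
  | nil => intro ys states r; simp [accB]
  | cons d rest ih =>
      intro ys states r
      show accB (states ++ [PySem.Int.mod (r + d) 100]) (r + d) (rest ++ ys) = _
      rw [ih]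
      have : r + d + rest.sum = r + (d :: rest).sum := by simp; ring
      rw [this]
      rfl

lemma last_seg (n : Nat) (states : List Int) (r dir : Int)
    (h : PySem.Int.mod r 100 = PySem.Int.mod (PySem.List.pyGetD states (-1) 0) 100) :
    PySem.Int.mod (r + n * dir) 100 =
      PySem.Int.mod (PySem.List.pyGetD (states ++ segAcc r dir n) (-1) 0) 100 := by
  cases n with
  | zero => simpa [segAcc] using h
  | succ m =>
      rw [segAcc_snoc, ← List.append_assoc, PySem.List.pyGetD_neg_one_append_singleton, mod100_idem]
      push_cast
      ring_nf

lemma main_eq (moves : List Int) : ∀ (states : List Int) (r : Int),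
    PySem.Int.mod r 100 = PySem.Int.mod (PySem.List.pyGetD states (-1) 0) 100 →
    goA states moves = accB states r (deltasB [] moves) := by
  induction moves with
  | nil => intro states r _; simp [goA, deltasB, accB]
  | cons move rest ih =>
      intro states r h
      -- unfold one step of B's deltas
      show goA states (move :: rest) = accB states r (deltasB (([] : List Int) ++ _) rest)
      rw [deltasB_acc, List.nil_append, accB_append, accB_replicate, List.sum_replicate,
        nsmul_eq_mul]
      by_cases hm : move > 0
      · -- direction = 1, the range counts up from last+1 to last+move
        have hstep : goA states (move :: rest) =
            goA (states ++ segAcc (PySem.List.pyGetD states (-1) 0) 1 move.natAbs) rest := by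
          show goA (states ++ _) rest = _
          have hb : PySem.List.pyGetD states (-1) 0 + (if move > 0 then (1:Int) else -1) + move
              = (PySem.List.pyGetD states (-1) 0 + 1) + (move.natAbs : Int) := by
            rw [if_pos hm]; omega
          rw [hb, if_pos hm, rangeA_pos move.natAbs]
          simp
        rw [hstep, if_pos hm,
          segAcc_congr move.natAbs (PySem.List.pyGetD states (-1) 0) r 1 h.symm]
        exact ih _ _ (last_seg move.natAbs states r 1 h)
      · -- direction = -1, the range counts down from last-1 to last+move
        have hstep : goA states (move :: rest) =
            goA (states ++ segAcc (PySem.List.pyGetD states (-1) 0) (-1) move.natAbs) rest := by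
          show goA (states ++ _) rest = _
          have hb : PySem.List.pyGetD states (-1) 0 + (if move > 0 then (1:Int) else -1) + move
              = (PySem.List.pyGetD states (-1) 0 + (-1)) - (move.natAbs : Int) := by
            rw [if_neg hm]; omega
          rw [hb, if_neg hm, rangeA_neg move.natAbs]
          have : PySem.List.pyGetD states (-1) 0 + (-1) + 1 = PySem.List.pyGetD states (-1) 0 := by
            ring
          rw [this]
        rw [hstep, if_neg hm,
          segAcc_congr move.natAbs (PySem.List.pyGetD states (-1) 0) r (-1) h.symm]
        exact ih _ _ (last_seg move.natAbs states r (-1) h)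

-- ===== VERDICT (by name: the statement is the Claim_ definition above) =====
theorem make_stream_spec : Claim_equal_make_stream := by
  intro start moves _
  show make_stream start moves = make_stream_alt start moves
  unfold make_stream make_stream_alt
  apply main_eq
  have : PySem.List.pyGetD ([start] : List Int) (-1) 0 = start := by
    simpa using PySem.List.pyGetD_neg_one_append_singleton (xs := ([] : List Int)) (x := start) (d := 0)
  rw [this]
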